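-- pv_equiv track=rewrite | github.com/LipeLacross/Programa-o-1 | Python Miniteste 6/Miniteste-6-Q3.py | check_repeated_elements
-- ===== SOURCE A (Python) =====
-- def check_repeated_elements(matriz):
--     verify = False
--     for om, m in enumerate(matriz):
--         for x in m:
--             for of, f in enumerate(matriz):
--                 if of > om:
--                     if x in matriz[of]:
--                         verify = True
--                         break
--     return verify
-- ===== SOURCE B (Python) =====
-- def check_repeated_elements(matriz):
--     seen = set()
--     for row in matriz:
--         for x in row:
--             if x in seen:
--                 return True
--         seen.update(row)
--     return False
-- ===== Notes on version B (the rewrite author's own statement) =====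
-- stated objective: faster
-- what changed: Replaced the triple nested scan (every element of every row searched in every later row) by a single pass that keeps a running set of values seen in earlier rows and checks each row against it.
import Mathlib
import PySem

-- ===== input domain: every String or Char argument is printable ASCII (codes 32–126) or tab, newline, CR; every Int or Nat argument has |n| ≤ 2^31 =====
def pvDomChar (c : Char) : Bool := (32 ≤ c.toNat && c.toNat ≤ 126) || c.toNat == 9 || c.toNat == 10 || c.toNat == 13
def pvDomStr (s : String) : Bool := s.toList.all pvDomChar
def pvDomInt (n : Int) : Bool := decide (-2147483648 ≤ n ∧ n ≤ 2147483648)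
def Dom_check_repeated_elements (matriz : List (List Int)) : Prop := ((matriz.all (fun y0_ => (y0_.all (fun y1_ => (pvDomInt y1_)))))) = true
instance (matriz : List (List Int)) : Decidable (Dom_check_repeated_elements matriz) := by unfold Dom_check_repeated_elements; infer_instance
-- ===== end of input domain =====

-- B replaces A's triple nested scan by one pass with a running set of values from earlier rows (asymptotically faster).

-- ===== PORT A =====
-- innermost loop 'for of, f in enumerate(matriz): if of > om: if x in matriz[of]: verify=True; break'
-- (matriz[of] = f, since of is f's own enumeration index); the break ends this scan with True.
def pvAInner (om : Int) (x : Int) : List (Int × List Int) → Bool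
  | [] => false
  | (of, f) :: rest =>
      if of > om then
        if x ∈ f then true else pvAInner om x rest
      else pvAInner om x rest

def check_repeated_elements (matriz : List (List Int)) : Bool :=
  (PySem.List.enumerate matriz).foldl
    (fun verify p =>
      p.2.foldl (fun v x => v || pvAInner p.1 x (PySem.List.enumerate matriz)) verify)
    false

-- ===== PORT B =====
-- the single pass of Source B: check each row against the set of values seen in earlier rows
def pvBGo (seen : PySem.Set Int) : List (List Int) → Bool
  | [] => false
  | row :: rest =>
      if row.any (fun x => PySem.Set.contains seen x) then true
      else pvBGo (PySem.Set.update seen row) rest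

def check_repeated_elements_alt (matriz : List (List Int)) : Bool :=
  pvBGo PySem.Set.empty matriz

-- ===== PRECONDITION & SPEC =====
def Spec_check_repeated_elements (matriz : List (List Int)) (out : Bool) : Prop := out = check_repeated_elements_alt matriz
instance (matriz : List (List Int)) (out : Bool) : Decidable (Spec_check_repeated_elements matriz out) := by unfold Spec_check_repeated_elements; infer_instance

-- ===== CLAIM (what is proved, stated in full; the proofs are below) =====
def Claim_equal_check_repeated_elements : Prop := ∀ (matriz : List (List Int)), Dom_check_repeated_elements matriz → Spec_check_repeated_elements matriz (check_repeated_elements matriz)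

-- ===== LEMMAS AND PROOFS =====

-- 'some row shares a value with a later row': middle form both ports are reduced to
def pvPair : List (List Int) → Bool
  | [] => false
  | row :: rest => row.any (fun x => rest.any (fun r => x ∈ r)) || pvPair rest

lemma pvAInner_eq_any (om : Int) (x : Int) (l : List (Int × List Int)) :
    pvAInner om x l = l.any (fun q => decide (om < q.1) && decide (x ∈ q.2)) := by
  induction l with
  | nil => rfl
  | cons p rest ih =>
      obtain ⟨of, f⟩ := p
      simp only [pvAInner, List.any_cons, ih]
      by_cases h1 : of > om <;> by_cases h2 : x ∈ f <;>
        simp_all [gt_iff_lt]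

lemma pvFoldl_or {α : Type} (f : α → Bool) (l : List α) (b : Bool) :
    l.foldl (fun v x => v || f x) b = (b || l.any f) := by
  induction l generalizing b with
  | nil => simp
  | cons x xs ih => simp [List.foldl_cons, ih, Bool.or_assoc]

lemma pvA_eq_any (matriz : List (List Int)) :
    check_repeated_elements matriz =
      (PySem.List.enumerate matriz).any (fun p =>
        p.2.any (fun x => (PySem.List.enumerate matriz).any
          (fun q => decide (p.1 < q.1) && decide (x ∈ q.2)))) := by
  unfold check_repeated_elements
  have h : ∀ (l : List (Int × List Int)) (b : Bool),
      l.foldl (fun verify p =>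
        p.2.foldl (fun v x => v || pvAInner p.1 x (PySem.List.enumerate matriz)) verify) b
      = (b || l.any (fun p =>
          p.2.any (fun x => (PySem.List.enumerate matriz).any
            (fun q => decide (p.1 < q.1) && decide (x ∈ q.2))))) := by
    intro l
    induction l with
    | nil => simp
    | cons p rest ih =>
        intro b
        rw [List.foldl_cons, ih, List.any_cons, pvFoldl_or]
        simp only [pvAInner_eq_any, Bool.or_assoc]
  rw [h (PySem.List.enumerate matriz) false, Bool.false_or]

-- index form of the shared-pair property
def pvShared (rows : List (List Int)) : Prop :=
  ∃ i j : Nat, i < j ∧ j < rows.length ∧ ∃ x : Int, x ∈ rows.getD i [] ∧ x ∈ rows.getD j []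

lemma pvShared_cons (row : List Int) (rest : List (List Int)) :
    pvShared (row :: rest) ↔ (∃ x ∈ row, ∃ r ∈ rest, x ∈ r) ∨ pvShared rest := by
  constructor
  · rintro ⟨i, j, hij, hj, x, hxi, hxj⟩
    cases i with
    | zero =>
        cases j with
        | zero => omega
        | succ j' =>
            have hj' : j' < rest.length := by simpa using hj
            refine Or.inl ⟨x, by simpa using hxi, rest.getD j' [], ?_, by simpa using hxj⟩
            rw [List.getD_eq_getElem rest [] hj']
            exact List.getElem_mem hj'
    | succ i' =>
        cases j with
        | zero => omega
        | succ j' =>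
            exact Or.inr ⟨i', j', by omega, by simpa using hj, x, by simpa using hxi, by simpa using hxj⟩
  · rintro (⟨x, hx, r, hr, hxr⟩ | ⟨i, j, hij, hj, x, hxi, hxj⟩)
    · obtain ⟨k, hk, hrk⟩ := List.getElem_of_mem hr
      refine ⟨0, k + 1, Nat.succ_pos _, by simpa using Nat.succ_lt_succ hk, x, by simpa using hx, ?_⟩
      rw [List.getD_cons_succ, List.getD_eq_getElem rest [] hk, hrk]
      exact hxr
    · exact ⟨i + 1, j + 1, Nat.succ_lt_succ hij, by simpa using Nat.succ_lt_succ hj,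
        x, by simpa using hxi, by simpa using hxj⟩

lemma pvPair_iff (rows : List (List Int)) : pvPair rows = true ↔ pvShared rows := by
  induction rows with
  | nil => simp [pvPair, pvShared]
  | cons row rest ih =>
      rw [pvShared_cons, ← ih]
      simp [pvPair]

lemma pvA_iff (matriz : List (List Int)) :
    check_repeated_elements matriz = true ↔ pvShared matriz := by
  rw [pvA_eq_any]
  simp only [List.any_eq_true, PySem.List.mem_enumerate_iff, Bool.and_eq_true, decide_eq_true_eq]
  constructor
  · rintro ⟨p, ⟨i, hi, rfl⟩, x, hx, q, ⟨j, hj, rfl⟩, hlt, hxq⟩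
    simp only at hlt hxq hx
    refine ⟨i, j, by omega, hj, x, ?_, ?_⟩
    · rw [List.getD_eq_getElem matriz [] hi]; exact hx
    · rw [List.getD_eq_getElem matriz [] hj]; exact hxq
  · rintro ⟨i, j, hij, hj, x, hxi, hxj⟩
    have hi : i < matriz.length := lt_trans hij hj
    rw [List.getD_eq_getElem matriz [] hi] at hxi
    rw [List.getD_eq_getElem matriz [] hj] at hxj
    refine ⟨(0 + (i : Int), matriz[i]), ⟨i, hi, rfl⟩, x, hxi,
      (0 + (j : Int), matriz[j]), ⟨j, hj, rfl⟩, ?_, hxj⟩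
    simp only
    omega

lemma pvBGo_iff (seen : PySem.Set Int) (rows : List (List Int)) :
    pvBGo seen rows = true ↔ (∃ r ∈ rows, ∃ x ∈ r, x ∈ seen) ∨ pvPair rows = true := by
  induction rows generalizing seen with
  | nil => simp [pvBGo, pvPair]
  | cons row rest ih =>
      by_cases hc : (row.any fun x => PySem.Set.contains seen x) = true
      · rw [pvBGo, if_pos hc]
        obtain ⟨x, hx, hxs⟩ : ∃ x ∈ row, x ∈ seen := by
          simpa [PySem.Set.contains_iff] using hc
        exact ⟨fun _ => Or.inl ⟨row, List.mem_cons_self, x, hx, hxs⟩, fun _ => rfl⟩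
      · rw [pvBGo, if_neg hc, ih]
        have hno : ∀ x ∈ row, x ∉ seen := by
          intro x hx hxs
          exact hc (List.any_eq_true.mpr ⟨x, hx, (PySem.Set.contains_iff seen x).mpr hxs⟩)
        constructor
        · rintro (⟨r, hr, x, hx, hxs⟩ | hp)
          · rcases (PySem.Set.mem_update seen row x).mp hxs with hs | hrow
            · exact Or.inl ⟨r, List.mem_cons_of_mem _ hr, x, hx, hs⟩
            · refine Or.inr ?_
              rw [pvPair, Bool.or_eq_true]
              refine Or.inl ?_
              simp only [List.any_eq_true, decide_eq_true_eq]
              exact ⟨x, hrow, r, hr, hx⟩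
          · refine Or.inr ?_
            rw [pvPair, Bool.or_eq_true]
            exact Or.inr hp
        · rintro (⟨r, hr, x, hx, hxs⟩ | hp)
          · rcases List.mem_cons.mp hr with rfl | hr'
            · exact absurd hxs (hno x hx)
            · exact Or.inl ⟨r, hr', x, hx, (PySem.Set.mem_update seen row x).mpr (Or.inl hxs)⟩
          · rw [pvPair, Bool.or_eq_true] at hp
            rcases hp with hrow | hp
            · simp only [List.any_eq_true, decide_eq_true_eq] at hrow
              obtain ⟨x, hx, r, hr, hxr⟩ := hrow
              exact Or.inl ⟨r, hr, x, hxr, (PySem.Set.mem_update seen row x).mpr (Or.inr hx)⟩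
            · exact Or.inr hp

lemma pvB_iff (matriz : List (List Int)) :
    check_repeated_elements_alt matriz = true ↔ pvShared matriz := by
  rw [check_repeated_elements_alt, pvBGo_iff, ← pvPair_iff]
  constructor
  · rintro (⟨r, _, x, _, hxs⟩ | hp)
    · exact absurd hxs (by simp [PySem.Set.empty])
    · exact hp
  · exact Or.inr

-- ===== VERDICT (by name: the statement is the Claim_ definition above) =====
theorem check_repeated_elements_spec : Claim_equal_check_repeated_elements := by
  intro matriz _
  unfold Spec_check_repeated_elements
  have h := (pvA_iff matriz).trans (pvB_iff matriz).symm
  exact Bool.eq_iff_iff.mpr h |>.symm ▸ rfl
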